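-- pv_equiv track=rewrite | github.com/LykhinIgor/lab04-1 | main/lib.py | func
-- ===== SOURCE A (Python) =====
-- def func(lists):
--     count = 0
--     for i in range(len(lists) - 1):
--         for j in range(len(lists[i])):
--             for k in range(len(lists[i + 1])):
--                 if lists[i][j] == lists[i + 1][k]:
--                     count += 1
--     return count
-- ===== SOURCE B (Python) =====
-- def func(lists):
--     total = 0
--     for prev, nxt in zip(lists, lists[1:]):
--         c = {}
--         for x in prev:
--             c[x] = c.get(x, 0) + 1
--         for x in nxt:
--             total += c.get(x, 0)
--     return total
-- ===== Notes on version B (the rewrite author's own statement) =====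
-- stated objective: faster
-- what changed: Replaced the nested all-pairs scan of each adjacent list pair by building a value-frequency dict of the first list once and summing lookups over the second list.
import Mathlib
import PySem

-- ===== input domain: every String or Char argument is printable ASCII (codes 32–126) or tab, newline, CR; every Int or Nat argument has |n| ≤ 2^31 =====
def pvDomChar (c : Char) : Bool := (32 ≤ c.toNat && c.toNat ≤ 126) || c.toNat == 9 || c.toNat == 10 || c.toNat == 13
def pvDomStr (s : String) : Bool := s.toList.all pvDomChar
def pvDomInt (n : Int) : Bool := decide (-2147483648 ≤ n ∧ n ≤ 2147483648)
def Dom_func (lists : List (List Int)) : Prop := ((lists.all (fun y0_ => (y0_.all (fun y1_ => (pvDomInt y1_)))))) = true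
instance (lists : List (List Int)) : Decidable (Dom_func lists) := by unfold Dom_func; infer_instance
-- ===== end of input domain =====

-- B replaces A's nested all-pairs scan of each adjacent list pair by building a value-frequency dict of the first list and summing lookups over the second (faster).


-- ===== PORT A =====
def func (lists : List (List Int)) : Int :=
  (PySem.List.pyRange 0 ((lists.length : Int) - 1) 1).foldl (fun count i =>
    let li := PySem.List.pyGetD lists i []
    let li1 := PySem.List.pyGetD lists (i + 1) []
    (PySem.List.pyRange 0 (li.length : Int) 1).foldl (fun count j =>
      (PySem.List.pyRange 0 (li1.length : Int) 1).foldl (fun count k =>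
        if PySem.List.pyGetD li j 0 == PySem.List.pyGetD li1 k 0 then count + 1 else count)
        count) count) 0

-- ===== PORT B =====
def func_alt (lists : List (List Int)) : Int :=
  (lists.zip (PySem.List.slice lists (some 1) none)).foldl (fun total pr =>
    let c := pr.1.foldl (fun d x => d.insert x (d.getD x 0 + 1)) PySem.Dict.empty
    pr.2.foldl (fun t x => t + c.getD x 0) total) 0

-- ===== PRECONDITION & SPEC =====
def Spec_func (lists : List (List Int)) (out : Int) : Prop := out = func_alt lists
instance (lists : List (List Int)) (out : Int) : Decidable (Spec_func lists out) := by unfold Spec_func; infer_instance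

-- ===== CLAIM (what is proved, stated in full; the proofs are below) =====
def Claim_equal_func : Prop := ∀ (lists : List (List Int)), Dom_func lists → Spec_func lists (func lists)

-- ===== LEMMAS AND PROOFS =====

theorem beqInt_comm (u v : Int) : (u == v) = (v == u) := by
  by_cases h : u = v
  · simp [h]
  · simp [h]
    exact fun e => h e.symm

-- A's inner two loops over one adjacent pair count Σ_{x ∈ a} (occurrences of x in b)
theorem pairA (a b : List Int) (c : Int) :
    (PySem.List.pyRange 0 (a.length : Int) 1).foldl (fun count j =>
      (PySem.List.pyRange 0 (b.length : Int) 1).foldl (fun count k =>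
        if PySem.List.pyGetD a j 0 == PySem.List.pyGetD b k 0 then count + 1 else count)
        count) c
    = c + (a.map (fun x => (b.count x : Int))).sum := by
  rw [PySem.List.foldl_pyRange_zero_pyGetD' a 0
      (fun count x => (PySem.List.pyRange 0 (b.length : Int) 1).foldl (fun count k =>
        if x == PySem.List.pyGetD b k 0 then count + 1 else count) count) c]
  rw [PySem.List.foldl_congr_mem a _ (fun count x => count + (b.count x : Int)) c ?_]
  · exact PySem.List.foldl_add _ _ _
  · intro acc x _
    rw [PySem.List.foldl_pyRange_zero_pyGetD' b 0
        (fun count y => if x == y then count + 1 else count) acc]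
    rw [PySem.List.foldl_congr_mem b _ (fun count y => if y == x then count + 1 else count) acc
        (by intro acc' y _; rw [beqInt_comm])]
    exact PySem.List.foldl_beq_add_one _ _ _

-- B's dict-lookup loop over one adjacent pair counts Σ_{x ∈ b} (occurrences of x in a)
theorem pairB (a b : List Int) (c : Int) :
    b.foldl (fun t x => t +
      (a.foldl (fun d x => d.insert x (d.getD x 0 + 1)) PySem.Dict.empty).getD x 0) c
    = c + (b.map (fun x => (a.count x : Int))).sum := by
  rw [PySem.List.foldl_congr_mem b _ (fun t x => t + (a.count x : Int)) c
      (by intro acc x _; rw [PySem.Dict.getD_foldl_insert_add_one]; simp [PySem.Dict.getD])]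
  exact PySem.List.foldl_add _ _ _

-- double counting: Σ_{x ∈ a} count_b(x) = Σ_{x ∈ b} count_a(x)
theorem sum_count_comm (a b : List Int) :
    (a.map (fun x => (b.count x : Int))).sum = (b.map (fun x => (a.count x : Int))).sum := by
  induction b with
  | nil => simp
  | cons y t ih =>
    simp only [List.count_cons, List.map_cons, List.sum_cons]
    push_cast
    rw [PySem.List.sum_map_add_int, ih, PySem.List.sum_map_ite_one_zero]
    have : List.countP (BEq.beq y) a = List.count y a := by
      unfold List.count
      apply List.countP_congr
      intro x _
      rw [beqInt_comm y x]
    rw [this]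
    ring

theorem main_eq (lists : List (List Int)) : func lists = func_alt lists := by
  unfold func func_alt
  simp only []
  rw [PySem.List.foldl_congr_mem _ _
      (fun count i => count + ((PySem.List.pyGetD lists i []).map
        (fun x => ((PySem.List.pyGetD lists (i + 1) []).count x : Int))).sum) 0
      (by intro acc i _; exact pairA _ _ _)]
  rw [PySem.List.foldl_congr_mem _ _
      (fun (total : Int) (pr : List Int × List Int) => total + (pr.2.map (fun x => (pr.1.count x : Int))).sum) 0
      (by intro acc pr _; exact pairB _ _ _)]
  rw [PySem.List.foldl_add, PySem.List.foldl_add]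
  congr 1
  rw [PySem.List.slice_from_one]
  apply congrArg
  apply List.ext_getElem
  · simp [PySem.List.length_pyRange_one, List.length_zip]
  · intro k hk1 hk2
    have hlen : k + 1 < lists.length := by
      simp [PySem.List.length_pyRange_one] at hk1; omega
    simp only [List.getElem_map, PySem.List.getElem_pyRange_one, List.getElem_zip, List.getElem_tail]
    have h1 : PySem.List.pyGetD lists ((0 : Int) + (k : Int)) [] = lists[k] := by
      rw [zero_add, PySem.List.pyGetD_natCast]
      exact List.getD_eq_getElem _ _ (by omega)
    have h2 : PySem.List.pyGetD lists ((0 : Int) + (k : Int) + 1) [] = lists[k + 1] := by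
      have : ((0 : Int) + (k : Int) + 1) = ((k + 1 : Nat) : Int) := by push_cast; ring
      rw [this, PySem.List.pyGetD_natCast]
      exact List.getD_eq_getElem _ _ (by omega)
    rw [h1, h2]
    exact sum_count_comm _ _

-- ===== VERDICT (by name: the statement is the Claim_ definition above) =====
theorem func_spec : Claim_equal_func := by
  intro lists _
  unfold Spec_func
  exact main_eq lists
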